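-- pv_equiv track=rewrite | github.com/Rutuja-AI/algomap | backend/smart_split.py | _strip_comment_only_edges
-- ===== SOURCE A (Python) =====
-- def _strip_comment_only_edges(seg: dict) -> dict:
--     lines = (seg.get("code") or "").splitlines()
--     def is_noise(s: str) -> bool:
--         t = (s or "").strip()
--         return (not t) or t.startswith("#")
--     i, j = 0, len(lines) - 1
--     while i <= j and is_noise(lines[i]):
--         i += 1
--     while j >= i and is_noise(lines[j]):
--         j -= 1
--     seg["code"] = "\n".join(lines[i:j+1]) if i <= j else ""
--     return seg
-- ===== SOURCE B (Python) =====
-- def _strip_comment_only_edges(seg: dict) -> dict: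
--     lines = (seg.get("code") or "").splitlines()
--     def is_noise(s: str) -> bool:
--         t = (s or "").strip()
--         return (not t) or t.startswith("#")
--     keep = [k for k, l in enumerate(lines) if not is_noise(l)]
--     seg["code"] = "\n".join(lines[keep[0]:keep[-1] + 1]) if keep else ""
--     return seg
-- ===== Notes on version B (the rewrite author's own statement) =====
-- stated objective: simpler
-- what changed: Replaces the two inward-moving while-loop pointers with a single comprehension that collects the indices of all non-noise lines and then slices from the first to the last of them.
import Mathlib
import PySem

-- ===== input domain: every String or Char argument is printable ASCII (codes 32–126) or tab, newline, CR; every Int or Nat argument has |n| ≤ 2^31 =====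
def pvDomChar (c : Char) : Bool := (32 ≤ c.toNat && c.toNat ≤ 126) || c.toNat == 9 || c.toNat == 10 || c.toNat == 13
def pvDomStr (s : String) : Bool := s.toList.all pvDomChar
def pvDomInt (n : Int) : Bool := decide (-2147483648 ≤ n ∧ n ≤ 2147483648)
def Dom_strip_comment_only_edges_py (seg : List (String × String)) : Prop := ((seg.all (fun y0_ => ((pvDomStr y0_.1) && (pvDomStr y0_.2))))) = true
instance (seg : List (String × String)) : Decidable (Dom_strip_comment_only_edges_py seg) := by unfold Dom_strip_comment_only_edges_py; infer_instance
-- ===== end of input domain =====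

-- B replaces A's two inward-moving while-loop pointers by one comprehension collecting the
-- indices of all non-noise lines and slicing from the first to the last of them (objective:
-- simpler). Both Pythons mutate seg["code"] in place identically; the equality proved is about
-- the returned dict.

-- ===== PORT A =====
-- is_noise: `(s or "").strip()` — s is always a str here, so `s or ""` is s itself.
def pyIsNoise (s : String) : Bool :=
  let t := PySem.Str.strip s
  (t == "") || PySem.Str.startswith t "#"

-- `while i <= j and is_noise(lines[i]): i += 1` — lines[i] is only read when 0 ≤ i ≤ j < len,
-- so pyGetD with a dummy default is exact.
def loopI (lines : List String) (i j : Int) : Int :=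
  if h : i ≤ j ∧ pyIsNoise (PySem.List.pyGetD lines i "") = true then loopI lines (i + 1) j else i
termination_by (j + 1 - i).toNat
decreasing_by
  have h1 := h.1
  omega

-- `while j >= i and is_noise(lines[j]): j -= 1`
def loopJ (lines : List String) (i j : Int) : Int :=
  if h : i ≤ j ∧ pyIsNoise (PySem.List.pyGetD lines j "") = true then loopJ lines i (j - 1) else j
termination_by (j + 1 - i).toNat
decreasing_by
  have h1 := h.1
  omega

def strip_comment_only_edges_py (seg : List (String × String)) : List (String × String) :=
  let d := PySem.Dict.ofList seg
  let code := (d.get? "code").getD ""          -- seg.get("code") or ""  (None → "", and "" or "" = "")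
  let lines := PySem.Str.splitlines code
  let i := loopI lines 0 ((lines.length : Int) - 1)
  let j := loopJ lines i ((lines.length : Int) - 1)
  let res := if i ≤ j then PySem.Str.join "\n" (PySem.List.slice lines (some i) (some (j + 1))) else ""
  (d.insert "code" res).items

-- ===== PORT B =====
def strip_comment_only_edges_py_alt (seg : List (String × String)) : List (String × String) :=
  let d := PySem.Dict.ofList seg
  let code := (d.get? "code").getD ""
  let lines := PySem.Str.splitlines code
  let keep := ((PySem.List.enumerate lines 0).filter (fun kl => !pyIsNoise kl.2)).map (·.1)
  let res := if keep.isEmpty then ""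
             else PySem.Str.join "\n" (PySem.List.slice lines (some keep.headI) (some (keep.getLastD 0 + 1)))
  (d.insert "code" res).items

-- ===== PRECONDITION & SPEC =====
def Spec_strip_comment_only_edges_py (seg : List (String × String)) (out : List (String × String)) : Prop := out = strip_comment_only_edges_py_alt seg
instance (seg : List (String × String)) (out : List (String × String)) : Decidable (Spec_strip_comment_only_edges_py seg out) := by unfold Spec_strip_comment_only_edges_py; infer_instance

-- ===== CLAIM (what is proved, stated in full; the proofs are below) =====
def Claim_equal_strip_comment_only_edges_py : Prop := ∀ (seg : List (String × String)), Dom_strip_comment_only_edges_py seg → Spec_strip_comment_only_edges_py seg (strip_comment_only_edges_py seg)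

-- ===== LEMMAS AND PROOFS =====

-- the index table B builds, with an arbitrary enumeration start (proof helper)
def keepF (o : Int) (lines : List String) : List Int :=
  ((PySem.List.enumerate lines o).filter (fun kl => !pyIsNoise kl.2)).map (·.1)

theorem dropWhile_head_false (l : List String) (x : String) (s' : List String)
    (h : l.dropWhile pyIsNoise = x :: s') : pyIsNoise x = false := by
  induction l with
  | nil => simp at h
  | cons a t ih =>
    rw [List.dropWhile_cons] at h
    split at h
    · exact ih h
    · next hp =>
      cases h
      simpa using hp

theorem tw_append_ex (l l' : List String) (x : String) (hx : x ∈ l) (hpx : pyIsNoise x = false) :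
    (l ++ l').takeWhile pyIsNoise = l.takeWhile pyIsNoise := by
  induction l with
  | nil => simp at hx
  | cons a t ih =>
    rcases List.mem_cons.mp hx with rfl | hx'
    · simp [List.takeWhile_cons, hpx]
    · by_cases hpa : pyIsNoise a = true
      · simp [List.takeWhile_cons, hpa, ih hx']
      · simp [List.takeWhile_cons, Bool.eq_false_iff.mpr hpa]

theorem tw_append_all (l l' : List String) (h : ∀ x ∈ l, pyIsNoise x = true) :
    (l ++ l').takeWhile pyIsNoise = l ++ l'.takeWhile pyIsNoise := by
  induction l with
  | nil => simp
  | cons a t ih =>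
    have ha := h a (by simp)
    simp only [List.cons_append, List.takeWhile_cons, ha]
    simp [ih (fun x hx => h x (by simp [hx]))]

theorem keepF_nil_iff (lines : List String) : ∀ (o : Int),
    (keepF o lines = [] ↔ ∀ x ∈ lines, pyIsNoise x = true) := by
  induction lines with
  | nil => intro o; simp [keepF, PySem.List.enumerate_nil]
  | cons a t ih =>
    intro o
    by_cases hpa : pyIsNoise a = true
    · have he : keepF o (a :: t) = keepF (o + 1) t := by
        simp [keepF, PySem.List.enumerate_cons, List.filter_cons, hpa]
      rw [he, ih (o + 1)]
      constructor
      · intro h x hx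
        rcases List.mem_cons.mp hx with rfl | hx'
        · exact hpa
        · exact h x hx'
      · intro h x hx
        exact h x (List.mem_cons_of_mem a hx)
    · simp only [keepF, PySem.List.enumerate_cons, List.filter_cons]
      simp [Bool.eq_false_iff.mpr hpa, hpa]

theorem keepF_head? (lines : List String) : ∀ (o : Int), keepF o lines ≠ [] →
    (keepF o lines).head? = some (o + ((lines.takeWhile pyIsNoise).length : Int)) := by
  induction lines with
  | nil => intro o h; simp [keepF, PySem.List.enumerate_nil] at h
  | cons a t ih =>
    intro o h
    by_cases hpa : pyIsNoise a = true
    · have he : keepF o (a :: t) = keepF (o + 1) t := by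
        simp [keepF, PySem.List.enumerate_cons, List.filter_cons, hpa]
      rw [he] at h ⊢
      rw [ih (o + 1) h, List.takeWhile_cons, hpa]
      simp; omega
    · have he : keepF o (a :: t) = o :: keepF (o + 1) t := by
        simp [keepF, PySem.List.enumerate_cons, List.filter_cons, Bool.eq_false_iff.mpr hpa]
      rw [he, List.takeWhile_cons, Bool.eq_false_iff.mpr hpa]
      simp

theorem keepF_getLast? (lines : List String) : ∀ (o : Int), keepF o lines ≠ [] →
    (keepF o lines).getLast? =
      some (o + (lines.length : Int) - 1 - ((lines.reverse.takeWhile pyIsNoise).length : Int)) := by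
  induction lines with
  | nil => intro o h; simp [keepF, PySem.List.enumerate_nil] at h
  | cons a t ih =>
    intro o h
    by_cases ht : keepF (o + 1) t = []
    · -- every line of t is noise; since keepF o (a :: t) ≠ [], a is not noise
      have hall : ∀ x ∈ t, pyIsNoise x = true := (keepF_nil_iff t (o + 1)).mp ht
      have hpa : pyIsNoise a = false := by
        by_contra hpa'
        have : pyIsNoise a = true := by revert hpa'; cases pyIsNoise a <;> simp
        exact h ((keepF_nil_iff (a :: t) o).mpr (by
          intro x hx; rcases List.mem_cons.mp hx with rfl | hx' <;> [exact this; exact hall x hx']))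
      have he : keepF o (a :: t) = o :: keepF (o + 1) t := by
        simp [keepF, PySem.List.enumerate_cons, List.filter_cons, hpa]
      rw [he, ht]
      have htw : ((a :: t).reverse).takeWhile pyIsNoise = t.reverse := by
        simp only [List.reverse_cons]
        rw [tw_append_all t.reverse [a] (by intro x hx; exact hall x (List.mem_reverse.mp hx))]
        simp [List.takeWhile_cons, hpa]
      rw [htw]
      simp; omega
    · -- t contains a non-noise line
      obtain ⟨y, hy, hpy⟩ : ∃ y ∈ t, pyIsNoise y = false := by
        by_contra hc
        push_neg at hc
        exact ht ((keepF_nil_iff t (o + 1)).mpr (by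
          intro x hx
          have := hc x hx
          revert this; cases pyIsNoise x <;> simp))
      have htw : ((a :: t).reverse).takeWhile pyIsNoise = (t.reverse).takeWhile pyIsNoise := by
        simp only [List.reverse_cons]
        exact tw_append_ex t.reverse [a] y (List.mem_reverse.mpr hy) hpy
      have htlen : ((t.reverse).takeWhile pyIsNoise).length < t.length := by
        have hle := (List.takeWhile_sublist (p := pyIsNoise) (l := t.reverse)).length_le
        rw [List.length_reverse] at hle
        rcases Nat.lt_or_ge ((t.reverse.takeWhile pyIsNoise).length) t.length with h' | h'
        · exact h'
        · exfalso
          have : (t.reverse).takeWhile pyIsNoise = t.reverse :=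
            (List.takeWhile_sublist _).eq_of_length_le (by rw [List.length_reverse]; omega)
          have : pyIsNoise y = true := by
            have hmem : y ∈ (t.reverse).takeWhile pyIsNoise := by
              rw [this]; exact List.mem_reverse.mpr hy
            exact List.mem_takeWhile_imp hmem
          rw [hpy] at this; cases this
      have IH := ih (o + 1) ht
      rcases List.exists_cons_of_ne_nil ht with ⟨c, cs, hcs⟩
      by_cases hpa : pyIsNoise a = true
      · have he : keepF o (a :: t) = keepF (o + 1) t := by
          simp [keepF, PySem.List.enumerate_cons, List.filter_cons, hpa]
        rw [he, IH, htw]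
        simp; omega
      · have he : keepF o (a :: t) = o :: keepF (o + 1) t := by
          simp [keepF, PySem.List.enumerate_cons, List.filter_cons, Bool.eq_false_iff.mpr hpa]
        rw [he, hcs]
        rw [List.getLast?_cons_cons]
        rw [← hcs, IH, htw]
        simp; omega

theorem dropWhile_eq_drop_tw (l : List String) :
    l.dropWhile pyIsNoise = l.drop (l.takeWhile pyIsNoise).length := by
  induction l with
  | nil => simp
  | cons a t ih =>
    by_cases hpa : pyIsNoise a = true
    · simp [List.takeWhile_cons, List.dropWhile_cons, hpa, ih]
    · simp [List.takeWhile_cons, List.dropWhile_cons, Bool.eq_false_iff.mpr hpa]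

theorem loopI_spec (lines : List String) (i : Int) (h0 : 0 ≤ i) (hle : i ≤ (lines.length : Int)) :
    loopI lines i ((lines.length : Int) - 1) =
      i + (((lines.drop i.toNat).takeWhile pyIsNoise).length : Int) := by
  rw [loopI]
  split
  · next h =>
    obtain ⟨h1, h2⟩ := h
    have hi : i < (lines.length : Int) := by omega
    have hlt : i.toNat < lines.length := by omega
    have hgd : PySem.List.pyGetD lines i "" = lines[i.toNat] :=
      PySem.List.pyGetD_eq_getElem _ _ h0 hi
    rw [hgd] at h2
    have hdrop : lines.drop i.toNat = lines[i.toNat] :: lines.drop (i.toNat + 1) :=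
      List.drop_eq_getElem_cons hlt
    have IH := loopI_spec lines (i + 1) (by omega) (by omega)
    have ht : (i + 1).toNat = i.toNat + 1 := by omega
    rw [IH, hdrop, List.takeWhile_cons, h2, ht]
    simp; omega
  · next h =>
    by_cases hi : i < (lines.length : Int)
    · have hlt : i.toNat < lines.length := by omega
      have h2 : pyIsNoise (PySem.List.pyGetD lines i "") = false := by
        by_contra hc
        exact h ⟨by omega, by revert hc; cases pyIsNoise (PySem.List.pyGetD lines i "") <;> simp⟩
      have hgd : PySem.List.pyGetD lines i "" = lines[i.toNat] :=
        PySem.List.pyGetD_eq_getElem _ _ h0 hi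
      rw [hgd] at h2
      have hdrop : lines.drop i.toNat = lines[i.toNat] :: lines.drop (i.toNat + 1) :=
        List.drop_eq_getElem_cons hlt
      rw [hdrop, List.takeWhile_cons, h2]
      simp
    · have : lines.length ≤ i.toNat := by omega
      rw [List.drop_eq_nil_of_le this]
      simp
termination_by (lines.length - i.toNat)
decreasing_by omega

theorem loopJ_spec (lines : List String) (i j : Int) (h0 : 0 ≤ i) (hij : i - 1 ≤ j)
    (hj : j < (lines.length : Int)) :
    loopJ lines i j =
      i - 1 + (((((lines.drop i.toNat).take (j + 1 - i).toNat).reverse).dropWhile pyIsNoise).length : Int) := by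
  rw [loopJ]
  split
  · next h =>
    obtain ⟨h1, h2⟩ := h
    have hjn : j.toNat < lines.length := by omega
    have hgd : PySem.List.pyGetD lines j "" = lines[j.toNat] :=
      PySem.List.pyGetD_eq_getElem _ _ (by omega) hj
    rw [hgd] at h2
    have hsplit : (lines.drop i.toNat).take (j + 1 - i).toNat =
        (lines.drop i.toNat).take (j - i).toNat ++ [lines[j.toNat]] := by
      have h3 : (j + 1 - i).toNat = (j - i).toNat + 1 := by omega
      rw [h3, List.take_succ, List.getElem?_drop]
      have h4 : i.toNat + (j - i).toNat = j.toNat := by omega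
      rw [h4, List.getElem?_eq_getElem hjn]
      rfl
    have IH := loopJ_spec lines i (j - 1) h0 (by omega) (by omega)
    have h5 : (j - 1 + 1 - i).toNat = (j - i).toNat := by omega
    rw [IH, h5, hsplit, List.reverse_append]
    simp only [List.reverse_cons, List.reverse_nil, List.nil_append, List.cons_append,
      List.dropWhile_cons, h2]
    simp
  · next h =>
    by_cases hlt : i ≤ j
    · have hjn : j.toNat < lines.length := by omega
      have h2 : pyIsNoise (PySem.List.pyGetD lines j "") = false := by
        by_contra hc
        exact h ⟨hlt, by revert hc; cases pyIsNoise (PySem.List.pyGetD lines j "") <;> simp⟩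
      have hgd : PySem.List.pyGetD lines j "" = lines[j.toNat] :=
        PySem.List.pyGetD_eq_getElem _ _ (by omega) hj
      rw [hgd] at h2
      have hsplit : (lines.drop i.toNat).take (j + 1 - i).toNat =
          (lines.drop i.toNat).take (j - i).toNat ++ [lines[j.toNat]] := by
        have h3 : (j + 1 - i).toNat = (j - i).toNat + 1 := by omega
        rw [h3, List.take_succ, List.getElem?_drop]
        have h4 : i.toNat + (j - i).toNat = j.toNat := by omega
        rw [h4, List.getElem?_eq_getElem hjn]
        rfl
      rw [hsplit, List.reverse_append]
      simp only [List.reverse_cons, List.reverse_nil, List.nil_append, List.cons_append,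
        List.dropWhile_cons, h2]
      have hlen : ((lines.drop i.toNat).take (j - i).toNat).length = (j - i).toNat := by
        rw [List.length_take, List.length_drop]; omega
      simp only [Bool.false_eq_true, if_false, List.length_cons, List.length_reverse, hlen]
      omega
    · have h3 : (j + 1 - i).toNat = 0 := by omega
      rw [h3]
      simp; omega
termination_by (j + 1 - i).toNat
decreasing_by omega

-- the two cores compute the same "code" string for any list of lines
theorem res_eq (lines : List String) :
    (if loopI lines 0 ((lines.length : Int) - 1) ≤
        loopJ lines (loopI lines 0 ((lines.length : Int) - 1)) ((lines.length : Int) - 1)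
     then PySem.Str.join "\n" (PySem.List.slice lines
            (some (loopI lines 0 ((lines.length : Int) - 1)))
            (some (loopJ lines (loopI lines 0 ((lines.length : Int) - 1)) ((lines.length : Int) - 1) + 1)))
     else "")
    =
    (if (((PySem.List.enumerate lines 0).filter (fun kl => !pyIsNoise kl.2)).map (·.1)).isEmpty then ""
     else PySem.Str.join "\n" (PySem.List.slice lines
            (some ((((PySem.List.enumerate lines 0).filter (fun kl => !pyIsNoise kl.2)).map (·.1)).headI))
            (some ((((PySem.List.enumerate lines 0).filter (fun kl => !pyIsNoise kl.2)).map (·.1)).getLastD 0 + 1)))) := by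
  have hkeep : (((PySem.List.enumerate lines 0).filter (fun kl => !pyIsNoise kl.2)).map (·.1)) = keepF 0 lines := rfl
  set a := (lines.takeWhile pyIsNoise).length with ha
  have ha_le : a ≤ lines.length := (List.takeWhile_sublist _).length_le
  have hi : loopI lines 0 ((lines.length : Int) - 1) = (a : Int) := by
    have := loopI_spec lines 0 le_rfl (by omega)
    simpa using this
  set s := lines.drop a with hs
  have hs_len : s.length = lines.length - a := List.length_drop
  have hdw : lines.dropWhile pyIsNoise = s := by
    rw [hs, ha]
    exact dropWhile_eq_drop_tw lines
  set m := ((s.reverse.dropWhile pyIsNoise).length) with hm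
  have hj : loopJ lines (a : Int) ((lines.length : Int) - 1) = (a : Int) - 1 + (m : Int) := by
    have := loopJ_spec lines (a : Int) ((lines.length : Int) - 1) (by omega) (by omega) (by omega)
    rw [this]
    have h1 : ((lines.length : Int) - 1 + 1 - (a : Int)).toNat = lines.length - a := by omega
    have h2 : (a : Int).toNat = a := by omega
    rw [h1, h2, ← hs, ← hs_len, List.take_length]
  rw [hi, hj, hkeep]
  by_cases hnil : s = []
  · -- every line is noise (or there are no lines): both sides are ""
    have hm0 : m = 0 := by rw [hm, hnil]; simp
    have hknil : keepF 0 lines = [] := by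
      apply (keepF_nil_iff lines 0).mpr
      intro x hx
      by_contra hc
      have hxf : pyIsNoise x = false := by revert hc; cases pyIsNoise x <;> simp
      have : x ∈ lines.dropWhile pyIsNoise ∨ x ∈ lines.takeWhile pyIsNoise := by
        rcases List.mem_append.mp (by rw [List.takeWhile_append_dropWhile (p := pyIsNoise)]; exact hx) with h' | h'
        · exact Or.inr h'
        · exact Or.inl h'
      rcases this with h' | h'
      · rw [hdw, hnil] at h'; simp at h'
      · have := List.mem_takeWhile_imp h'
        rw [hxf] at this; cases this
    rw [hknil]
    simp only [List.isEmpty_nil, if_true]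
    rw [if_neg (by omega)]
  · obtain ⟨x, s', hxs⟩ := List.exists_cons_of_ne_nil hnil
    have hpx : pyIsNoise x = false := dropWhile_head_false lines x s' (by rw [hdw, hxs])
    have hxmem : x ∈ s := by rw [hxs]; simp
    have hm1 : 1 ≤ m := by
      rw [hm]
      by_contra hc
      have : s.reverse.dropWhile pyIsNoise = [] := by
        cases hdwn : s.reverse.dropWhile pyIsNoise with
        | nil => rfl
        | cons c cs => rw [hdwn] at hc; simp at hc
      have := (List.dropWhile_eq_nil_iff.mp this) x (List.mem_reverse.mpr hxmem)
      rw [hpx] at this; cases this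
    have hknn : keepF 0 lines ≠ [] := by
      intro hk
      have := (keepF_nil_iff lines 0).mp hk x (List.mem_of_mem_drop hxmem)
      rw [hpx] at this; cases this
    -- head and last of the index table
    have hh : (keepF 0 lines).headI = (a : Int) := by
      have := keepF_head? lines 0 hknn
      cases hkd : keepF 0 lines with
      | nil => exact absurd hkd hknn
      | cons k ks =>
        rw [hkd] at this
        simp only [List.head?_cons, Option.some.injEq] at this
        simp [List.headI, this, ha]
    have htws : (lines.reverse.takeWhile pyIsNoise).length = s.length - m := by
      have hrev : lines.reverse = s.reverse ++ (lines.takeWhile pyIsNoise).reverse := by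
        conv_lhs => rw [← List.takeWhile_append_dropWhile (p := pyIsNoise) (l := lines), hdw]
        simp
      rw [hrev, tw_append_ex s.reverse _ x (List.mem_reverse.mpr hxmem) hpx]
      have := congrArg List.length (List.takeWhile_append_dropWhile (p := pyIsNoise) (l := s.reverse))
      rw [List.length_append, List.length_reverse] at this
      omega
    have hmle : m ≤ s.length := by
      have := List.length_dropWhile_le (p := pyIsNoise) (l := s.reverse)
      rw [List.length_reverse] at this
      omega
    have hl : (keepF 0 lines).getLastD 0 = (a : Int) - 1 + (m : Int) := by
      have h1 := keepF_getLast? lines 0 hknn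
      rw [List.getLastD_eq_getLast?, h1]
      simp only [Option.getD_some]
      rw [htws]
      push_cast [hs_len]
      omega
    rw [hh, hl]
    have hne : ¬ (keepF 0 lines).isEmpty := by
      cases hkd : keepF 0 lines with
      | nil => exact absurd hkd hknn
      | cons k ks => simp
    rw [if_pos (by omega), if_neg (by simpa using hne)]

-- ===== VERDICT (by name: the statement is the Claim_ definition above) =====
theorem strip_comment_only_edges_py_spec : Claim_equal_strip_comment_only_edges_py := by
  intro seg _
  unfold Spec_strip_comment_only_edges_py strip_comment_only_edges_py strip_comment_only_edges_py_alt
  simp only [res_eq]
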